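-- pv_equiv track=rewrite | github.com/AaronS117/AI-Pokemon-emulator | modules/rng_pokemon.py | determine_encounter_slot
-- ===== SOURCE A (Python) =====
-- from typing import Dict, List, Optional, Tuple, TYPE_CHECKING
--
-- LCRNG_MULT = 0x41C64E6D
--
-- LCRNG_ADD = 0x00006073
--
-- def lcrng_next(seed: int) -> int:
--     """Advance the LCRNG by one step."""
--     return (seed * LCRNG_MULT + LCRNG_ADD) & 0xFFFF_FFFF
--
-- def lcrng_high16(seed: int) -> int:
--     """Extract the high 16 bits (the 'random number')."""
--     return (seed >> 16) & 0xFFFF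
--
-- WILD_SLOTS_LAND = [20, 40, 50, 60, 70, 80, 85, 90, 94, 98, 99, 100]
--
-- WILD_SLOTS_WATER = [60, 90, 95, 99, 100]
--
-- WILD_SLOTS_FISHING_OLD = [70, 100]
--
-- WILD_SLOTS_FISHING_GOOD = [60, 80, 100]
--
-- WILD_SLOTS_FISHING_SUPER = [40, 80, 95, 99, 100]
--
-- WILD_SLOTS_ROCK_SMASH = [60, 90, 95, 99, 100]
--
-- def determine_encounter_slot(
--     seed: int,
--     encounter_type: str = "land",
-- ) -> Tuple[int, int]:
--     """
--     Determine which encounter slot is selected.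
--
--     Args:
--         seed: Current RNG seed.
--         encounter_type: "land", "water", "old_rod", "good_rod", "super_rod", "rock_smash"
--
--     Returns:
--         (slot_index, seed_after)
--     """
--     s = lcrng_next(seed)
--     rand = lcrng_high16(s) % 100
--
--     slot_table = {
--         "land": WILD_SLOTS_LAND,
--         "water": WILD_SLOTS_WATER,
--         "old_rod": WILD_SLOTS_FISHING_OLD,
--         "good_rod": WILD_SLOTS_FISHING_GOOD,
--         "super_rod": WILD_SLOTS_FISHING_SUPER,
--         "rock_smash": WILD_SLOTS_ROCK_SMASH,
--     }
--
--     slots = slot_table.get(encounter_type, WILD_SLOTS_LAND)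
--     for i, threshold in enumerate(slots):
--         if rand < threshold:
--             return (i, s)
--
--     return (len(slots) - 1, s)
-- ===== SOURCE B (Python) =====
-- LCRNG_MULT = 0x41C64E6D
-- LCRNG_ADD = 0x00006073
--
-- WILD_SLOTS_LAND = [20, 40, 50, 60, 70, 80, 85, 90, 94, 98, 99, 100]
-- WILD_SLOTS_WATER = [60, 90, 95, 99, 100]
-- WILD_SLOTS_FISHING_OLD = [70, 100]
-- WILD_SLOTS_FISHING_GOOD = [60, 80, 100]
-- WILD_SLOTS_FISHING_SUPER = [40, 80, 95, 99, 100]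
-- WILD_SLOTS_ROCK_SMASH = [60, 90, 95, 99, 100]
--
-- SLOT_TABLE = {
--     "land": WILD_SLOTS_LAND,
--     "water": WILD_SLOTS_WATER,
--     "old_rod": WILD_SLOTS_FISHING_OLD,
--     "good_rod": WILD_SLOTS_FISHING_GOOD,
--     "super_rod": WILD_SLOTS_FISHING_SUPER,
--     "rock_smash": WILD_SLOTS_ROCK_SMASH,
-- }
--
--
-- def determine_encounter_slot(seed, encounter_type="land"):
--     """Same RNG advance; the slot is found by binary search (bisect-right) over
--     the strictly increasing threshold table instead of a left-to-right scan.
--     Tables end in 100 and rand < 100, so the search index is always valid."""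
--     s = (seed * LCRNG_MULT + LCRNG_ADD) & 0xFFFFFFFF
--     rand = ((s >> 16) & 0xFFFF) % 100
--     slots = SLOT_TABLE.get(encounter_type, WILD_SLOTS_LAND)
--     lo, hi = 0, len(slots)
--     while lo < hi:
--         mid = (lo + hi) // 2
--         if slots[mid] <= rand:
--             lo = mid + 1
--         else:
--             hi = mid
--     return (lo, s)
-- ===== Notes on version B (the rewrite author's own statement) =====
-- stated objective: alternative
-- what changed: The left-to-right enumerate scan over the threshold table (with an unreachable len-1 fallback) is replaced by a bisect-right binary search over the same strictly increasing table; the RNG advance and dict lookup are unchanged.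
import Mathlib
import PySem

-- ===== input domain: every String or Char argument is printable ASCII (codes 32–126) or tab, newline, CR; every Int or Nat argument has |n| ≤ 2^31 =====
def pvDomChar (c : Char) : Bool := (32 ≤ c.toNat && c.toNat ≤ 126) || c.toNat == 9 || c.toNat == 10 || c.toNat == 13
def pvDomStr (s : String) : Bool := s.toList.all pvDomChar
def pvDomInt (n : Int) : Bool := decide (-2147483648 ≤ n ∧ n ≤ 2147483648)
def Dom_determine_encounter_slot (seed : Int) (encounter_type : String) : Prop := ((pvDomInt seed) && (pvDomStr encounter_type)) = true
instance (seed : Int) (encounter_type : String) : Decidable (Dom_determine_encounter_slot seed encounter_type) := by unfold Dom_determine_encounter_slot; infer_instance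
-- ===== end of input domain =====

-- B replaces A's left-to-right threshold scan by a binary search over the same table (objective: alternative traversal; tables are tiny, no speed claim).

-- ===== PORT A =====
def LCRNG_MULT : Int := 0x41C64E6D
def LCRNG_ADD : Int := 0x00006073

def lcrng_next (seed : Int) : Int := PySem.Int.band (seed * LCRNG_MULT + LCRNG_ADD) 0xFFFFFFFF

def lcrng_high16 (seed : Int) : Int := PySem.Int.band (seed >>> 16) 0xFFFF

def WILD_SLOTS_LAND : List Int := [20, 40, 50, 60, 70, 80, 85, 90, 94, 98, 99, 100]
def WILD_SLOTS_WATER : List Int := [60, 90, 95, 99, 100]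
def WILD_SLOTS_FISHING_OLD : List Int := [70, 100]
def WILD_SLOTS_FISHING_GOOD : List Int := [60, 80, 100]
def WILD_SLOTS_FISHING_SUPER : List Int := [40, 80, 95, 99, 100]
def WILD_SLOTS_ROCK_SMASH : List Int := [60, 90, 95, 99, 100]

-- the 'for i, threshold in enumerate(slots): if rand < threshold: return i' loop
def scanSlots (slots : List Int) (rand : Int) (i : Int) : Option Int :=
  match slots with
  | [] => none
  | t :: rest => if rand < t then some i else scanSlots rest rand (i + 1)

def determine_encounter_slot (seed : Int) (encounter_type : String) : Int × Int :=
  let s := lcrng_next seed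
  let rand := PySem.Int.mod (lcrng_high16 s) 100
  let slot_table : PySem.Dict String (List Int) := PySem.Dict.ofList
    [("land", WILD_SLOTS_LAND), ("water", WILD_SLOTS_WATER), ("old_rod", WILD_SLOTS_FISHING_OLD),
     ("good_rod", WILD_SLOTS_FISHING_GOOD), ("super_rod", WILD_SLOTS_FISHING_SUPER),
     ("rock_smash", WILD_SLOTS_ROCK_SMASH)]
  let slots := slot_table.getD encounter_type WILD_SLOTS_LAND
  match scanSlots slots rand 0 with
  | some i => (i, s)
  | none => ((slots.length : Int) - 1, s)

-- ===== PORT B =====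
-- the 'while lo < hi' binary-search loop of Source B (index mid is always in range: mid < hi ≤ len)
def bsearchAux (slots : List Int) (rand : Int) : Nat → Nat → Nat → Nat
  | lo, _, 0 => lo   -- fuel guard only; fuel = len slots ≥ hi - lo never runs out
  | lo, hi, fuel + 1 =>
    if lo < hi then
      let mid := (lo + hi) / 2
      if slots.getD mid 0 ≤ rand then bsearchAux slots rand (mid + 1) hi fuel
      else bsearchAux slots rand lo mid fuel
    else lo

def bsearchSlots (slots : List Int) (rand : Int) (lo hi : Nat) : Nat :=
  bsearchAux slots rand lo hi slots.length

def determine_encounter_slot_alt (seed : Int) (encounter_type : String) : Int × Int :=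
  let s := PySem.Int.band (seed * LCRNG_MULT + LCRNG_ADD) 0xFFFFFFFF
  let rand := PySem.Int.mod (PySem.Int.band (s >>> 16) 0xFFFF) 100
  let slot_table : PySem.Dict String (List Int) := PySem.Dict.ofList
    [("land", WILD_SLOTS_LAND), ("water", WILD_SLOTS_WATER), ("old_rod", WILD_SLOTS_FISHING_OLD),
     ("good_rod", WILD_SLOTS_FISHING_GOOD), ("super_rod", WILD_SLOTS_FISHING_SUPER),
     ("rock_smash", WILD_SLOTS_ROCK_SMASH)]
  let slots := slot_table.getD encounter_type WILD_SLOTS_LAND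
  ((bsearchSlots slots rand 0 slots.length : Int), s)

-- ===== PRECONDITION & SPEC =====
def Spec_determine_encounter_slot (seed : Int) (encounter_type : String) (out : Int × Int) : Prop := out = determine_encounter_slot_alt seed encounter_type
instance (seed : Int) (encounter_type : String) (out : Int × Int) : Decidable (Spec_determine_encounter_slot seed encounter_type out) := by unfold Spec_determine_encounter_slot; infer_instance

-- ===== CLAIM (what is proved, stated in full; the proofs are below) =====
def Claim_equal_determine_encounter_slot : Prop := ∀ (seed : Int) (encounter_type : String), Dom_determine_encounter_slot seed encounter_type → Spec_determine_encounter_slot seed encounter_type (determine_encounter_slot seed encounter_type)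

-- ===== LEMMAS AND PROOFS =====

-- the six threshold tables (the default lookup also yields the land table)
def pvTables : List (List Int) :=
  [WILD_SLOTS_LAND, WILD_SLOTS_WATER, WILD_SLOTS_FISHING_OLD,
   WILD_SLOTS_FISHING_GOOD, WILD_SLOTS_FISHING_SUPER, WILD_SLOTS_ROCK_SMASH]

theorem table_mem (et : String) :
    (PySem.Dict.ofList
      [("land", WILD_SLOTS_LAND), ("water", WILD_SLOTS_WATER), ("old_rod", WILD_SLOTS_FISHING_OLD),
       ("good_rod", WILD_SLOTS_FISHING_GOOD), ("super_rod", WILD_SLOTS_FISHING_SUPER),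
       ("rock_smash", WILD_SLOTS_ROCK_SMASH)]).getD et WILD_SLOTS_LAND ∈ pvTables := by
  have h : PySem.Dict.ofList
      [("land", WILD_SLOTS_LAND), ("water", WILD_SLOTS_WATER), ("old_rod", WILD_SLOTS_FISHING_OLD),
       ("good_rod", WILD_SLOTS_FISHING_GOOD), ("super_rod", WILD_SLOTS_FISHING_SUPER),
       ("rock_smash", WILD_SLOTS_ROCK_SMASH)] = PySem.Dict.mk
      [("land", WILD_SLOTS_LAND), ("water", WILD_SLOTS_WATER), ("old_rod", WILD_SLOTS_FISHING_OLD),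
       ("good_rod", WILD_SLOTS_FISHING_GOOD), ("super_rod", WILD_SLOTS_FISHING_SUPER),
       ("rock_smash", WILD_SLOTS_ROCK_SMASH)] := by decide
  rw [h]
  simp only [PySem.Dict.getD, PySem.Dict.get?_mk_cons]
  split_ifs <;> simp [pvTables, PySem.Dict.get?]

-- transfer a Fin-100 verification to any integer rand in 0..99
theorem pick_fin (slots : List Int)
    (h : ∀ n : Fin 100, scanSlots slots ((n : Nat) : Int) 0 =
        some ((bsearchSlots slots ((n : Nat) : Int) 0 slots.length : Int)))
    (r : Int) (h0 : 0 ≤ r) (h1 : r < 100) :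
    scanSlots slots r 0 = some ((bsearchSlots slots r 0 slots.length : Int)) := by
  rw [← Int.toNat_of_nonneg h0]
  exact h ⟨r.toNat, by omega⟩

-- on every table, for rand in 0..99, the linear scan finds exactly the bisect-right index
theorem pick_eq (slots : List Int) (r : Int) (hmem : slots ∈ pvTables)
    (h0 : 0 ≤ r) (h1 : r < 100) :
    scanSlots slots r 0 = some ((bsearchSlots slots r 0 slots.length : Int)) := by
  fin_cases hmem <;> exact pick_fin _ (by decide) r h0 h1


-- ===== VERDICT (by name: the statement is the Claim_ definition above) =====
theorem determine_encounter_slot_spec : Claim_equal_determine_encounter_slot := by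
  intro seed et _
  unfold Spec_determine_encounter_slot
  unfold determine_encounter_slot determine_encounter_slot_alt lcrng_next lcrng_high16
  dsimp only
  rw [pick_eq _ _ (table_mem et)
      (PySem.Int.mod_nonneg _ (by norm_num)) (PySem.Int.mod_lt _ (by norm_num))]
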